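-- pv_equiv track=rewrite | github.com/Omykronn/INFO-MPSI-2021-2022 | tp_2/ex5.py | proches2
-- ===== SOURCE A (Python) =====
-- def proches2(L: list):
--     """
--     Retourne l'ensemble des couples d'élements à distance minimale
--
--     :param list L: Liste à analysée
--     :return list array: Ensemble des couples
--     """
--
--     def difference_abs(item1: float, item2: float):
--         """
--         Renvoie la valeur absolue de la différence de item1 et item2
--
--         :param float item1: Valeur 1
--         :param float item2: Valeur 2
--         :return float: Valeur absolue de la différence de item1 et item2
--         """
--         if item1 >= item2:
--             return item1 - item2
--         else:
--             return item2 - item1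
--
--     length = len(L)
--     array = []
--     distance = None
--
--     for i in range(length):
--         for j in range(i + 1, length):
--             if distance is None or difference_abs(L[i], L[j]) < distance:
--                 array = [(L[i], L[j])]
--                 distance = difference_abs(L[i], L[j])
--             elif difference_abs(L[i], L[j]) == distance:
--                 array.append((L[i], L[j]))
--
--     return array
-- ===== SOURCE B (Python) =====
-- def proches2(L: list):
--     n = len(L)
--     if n < 2:
--         return []
--     s = sorted(L)
--     d = min(s[k + 1] - s[k] for k in range(n - 1))
--     return [(L[i], L[j]) for i in range(n) for j in range(i + 1, n) if abs(L[i] - L[j]) == d]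
-- ===== Notes on version B (the rewrite author's own statement) =====
-- stated objective: faster
-- what changed: A finds the minimum distance by maintaining a running minimum with list resets inside the O(n^2) double loop (recomputing the difference up to three times per pair); B computes the minimum as the smallest adjacent gap of sorted(L) in O(n log n) and then collects the matching pairs in one comprehension pass.
import Mathlib
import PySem

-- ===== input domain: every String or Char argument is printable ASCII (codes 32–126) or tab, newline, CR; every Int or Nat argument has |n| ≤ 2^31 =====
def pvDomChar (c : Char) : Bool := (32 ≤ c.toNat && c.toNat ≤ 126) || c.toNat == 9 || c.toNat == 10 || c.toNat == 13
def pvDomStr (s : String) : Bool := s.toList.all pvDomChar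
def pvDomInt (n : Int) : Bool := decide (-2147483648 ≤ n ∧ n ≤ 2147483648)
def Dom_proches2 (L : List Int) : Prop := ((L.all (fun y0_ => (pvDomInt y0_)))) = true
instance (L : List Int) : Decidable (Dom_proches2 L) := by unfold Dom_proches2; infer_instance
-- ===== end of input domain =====

-- B replaces A's quadratic running-minimum bookkeeping by sort + min adjacent gap, then one filtering pass over the pairs (objective: faster by a constant factor).


-- ===== PORT A =====
def pvDiffAbs (item1 item2 : Int) : Int :=
  if item1 ≥ item2 then item1 - item2 else item2 - item1

-- indices i, j always lie in range, so pyGetD's default 0 is never used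
def proches2 (L : List Int) : List (Int × Int) :=
  let length : Int := L.length
  (((PySem.List.pyRange 0 length 1).foldl (fun (st : List (Int × Int) × Option Int) i =>
      (PySem.List.pyRange (i + 1) length 1).foldl (fun (st : List (Int × Int) × Option Int) j =>
        match st.2 with
        | none =>
            ([(PySem.List.pyGetD L i 0, PySem.List.pyGetD L j 0)],
             some (pvDiffAbs (PySem.List.pyGetD L i 0) (PySem.List.pyGetD L j 0)))
        | some distance =>
            if pvDiffAbs (PySem.List.pyGetD L i 0) (PySem.List.pyGetD L j 0) < distance then
              ([(PySem.List.pyGetD L i 0, PySem.List.pyGetD L j 0)],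
               some (pvDiffAbs (PySem.List.pyGetD L i 0) (PySem.List.pyGetD L j 0)))
            else if pvDiffAbs (PySem.List.pyGetD L i 0) (PySem.List.pyGetD L j 0) = distance then
              (st.1 ++ [(PySem.List.pyGetD L i 0, PySem.List.pyGetD L j 0)], some distance)
            else st) st) (([], none) : List (Int × Int) × Option Int))).1

-- ===== PORT B =====
def proches2_alt (L : List Int) : List (Int × Int) :=
  let n : Int := L.length
  if n < 2 then []
  else
    let s := PySem.List.sorted L (fun x => x) false
    let d := (PySem.List.min?
      ((PySem.List.pyRange 0 (n - 1) 1).map (fun k =>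
        PySem.List.pyGetD s (k + 1) 0 - PySem.List.pyGetD s k 0)) (fun x => x)).getD 0
    (PySem.List.pyRange 0 n 1).flatMap (fun i =>
      ((PySem.List.pyRange (i + 1) n 1).filter (fun j =>
          decide (|PySem.List.pyGetD L i 0 - PySem.List.pyGetD L j 0| = d))).map (fun j =>
        (PySem.List.pyGetD L i 0, PySem.List.pyGetD L j 0)))

-- ===== PRECONDITION & SPEC =====
def Spec_proches2 (L : List Int) (out : List (Int × Int)) : Prop := out = proches2_alt L
instance (L : List Int) (out : List (Int × Int)) : Decidable (Spec_proches2 L out) := by unfold Spec_proches2; infer_instance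

-- ===== CLAIM (what is proved, stated in full; the proofs are below) =====
def Claim_equal_proches2 : Prop := ∀ (L : List Int), Dom_proches2 L → Spec_proches2 L (proches2 L)

-- ===== LEMMAS AND PROOFS =====

-- all ordered pairs (earlier element, later element) of L, in A's (i, j) traversal order
def pvPairs : List Int → List (Int × Int)
  | [] => []
  | a :: t => t.map (fun y => (a, y)) ++ pvPairs t

-- A's loop body, as a function of the state and the current value pair
def pvStep (st : List (Int × Int) × Option Int) (p : Int × Int) : List (Int × Int) × Option Int :=
  match st.2 with
  | none => ([p], some (pvDiffAbs p.1 p.2))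
  | some distance =>
      if pvDiffAbs p.1 p.2 < distance then ([p], some (pvDiffAbs p.1 p.2))
      else if pvDiffAbs p.1 p.2 = distance then (st.1 ++ [p], some distance) else st

-- running minimum of the pair differences, seeded with d
def pvMinD (P : List (Int × Int)) (d : Int) : Int :=
  (P.map (fun p => pvDiffAbs p.1 p.2)).foldl min d

-- adjacent gaps of a list
def pvAdjGaps : List Int → List Int
  | a :: b :: t => (b - a) :: pvAdjGaps (b :: t)
  | _ => []

-- the value B computes: the minimum adjacent gap of the sorted list
def pvDStar (L : List Int) : Int :=
  (PySem.List.min? (pvAdjGaps (PySem.List.sorted L (fun x => x) false)) (fun x => x)).getD 0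

lemma pvDiffAbs_abs (x y : Int) : pvDiffAbs x y = |x - y| := by
  unfold pvDiffAbs
  rcases le_total y x with h | h
  · rw [if_pos h, abs_of_nonneg (by omega)]
  · rw [abs_sub_comm]
    rcases eq_or_lt_of_le h with rfl | hlt
    · simp
    · rw [if_neg (by omega), abs_of_nonneg (by omega)]

lemma pvRange_shift (c n : Int) :
    PySem.List.pyRange (c + 1) (n + 1) 1 = (PySem.List.pyRange c n 1).map (· + 1) := by
  rw [PySem.List.pyRange_one, PySem.List.pyRange_one, List.map_map]
  have h : n + 1 - (c + 1) = n - c := by ring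
  rw [h]
  apply List.map_congr_left
  intro k _
  simp; ring

lemma pvGetD_cons_succ (a : Int) (t : List Int) (i : Int) (h : 0 ≤ i) :
    PySem.List.pyGetD (a :: t) (i + 1) 0 = PySem.List.pyGetD t i 0 := by
  obtain ⟨k, rfl⟩ := Int.eq_ofNat_of_zero_le h
  have h2 : (k : Int) + 1 = ((k + 1 : Nat) : Int) := by push_cast; ring
  rw [h2, PySem.List.pyGetD_natCast, PySem.List.pyGetD_natCast]
  simp

lemma pvNestedFold {σ : Type} (g : σ → Int → Int → σ) :
    ∀ (L : List Int) (st : σ),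
    (PySem.List.pyRange 0 (L.length : Int) 1).foldl
      (fun st i => (PySem.List.pyRange (i + 1) (L.length : Int) 1).foldl
        (fun st j => g st (PySem.List.pyGetD L i 0) (PySem.List.pyGetD L j 0)) st) st
    = (pvPairs L).foldl (fun st p => g st p.1 p.2) st := by
  intro L
  induction L with
  | nil => intro st; simp [pvPairs, PySem.List.pyRange_one_eq_nil]
  | cons a t ih =>
    intro st
    have hn : ((a :: t).length : Int) = (t.length : Int) + 1 := by simp
    rw [hn]
    rw [PySem.List.pyRange_one_cons (by positivity)]
    rw [List.foldl_cons]
    -- first iteration i = 0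
    have h0 : (PySem.List.pyRange (0 + 1) ((t.length : Int) + 1) 1).foldl
        (fun st j => g st (PySem.List.pyGetD (a :: t) 0 0) (PySem.List.pyGetD (a :: t) j 0)) st
        = (t.map (fun y => (a, y))).foldl (fun st p => g st p.1 p.2) st := by
      have := PySem.List.foldl_pyRange_pyGetD' (xs := a :: t) (d := 0)
        (f := fun acc v => g acc (PySem.List.pyGetD (a :: t) 0 0) v) (init := st)
        (a := 0 + 1) (by norm_num)
      rw [show ((a :: t).length : Int) = (t.length : Int) + 1 from hn] at this
      rw [this]
      simp [List.foldl_map, PySem.List.pyGetD_zero_cons]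
    rw [h0]
    -- rest of the outer loop
    have h1 : (PySem.List.pyRange (0 + 1) ((t.length : Int) + 1) 1) =
        (PySem.List.pyRange 0 (t.length : Int) 1).map (· + 1) := pvRange_shift 0 _
    rw [h1, List.foldl_map]
    have hcong := PySem.List.foldl_congr_mem
      (l := PySem.List.pyRange 0 (t.length : Int) 1)
      (init := (t.map (fun y => (a, y))).foldl (fun st p => g st p.1 p.2) st)
      (f := fun x k =>
        (PySem.List.pyRange (k + 1 + 1) ((t.length : Int) + 1) 1).foldl
          (fun st j => g st (PySem.List.pyGetD (a :: t) (k + 1) 0) (PySem.List.pyGetD (a :: t) j 0)) x)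
      (g := fun x k =>
        (PySem.List.pyRange (k + 1) (t.length : Int) 1).foldl
          (fun st j => g st (PySem.List.pyGetD t k 0) (PySem.List.pyGetD t j 0)) x)
      ?_
    · rw [hcong, ih]
      simp [pvPairs, List.foldl_append]
    · intro acc k hk
      have hk0 : 0 ≤ k := ((PySem.List.mem_pyRange_one).1 hk).1
      dsimp only
      have e1 : PySem.List.pyRange (k + 1 + 1) ((t.length : Int) + 1) 1 =
          (PySem.List.pyRange (k + 1) (t.length : Int) 1).map (· + 1) := pvRange_shift _ _
      rw [e1, List.foldl_map, pvGetD_cons_succ a t k hk0]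
      apply PySem.List.foldl_congr_mem
      intro acc' j hj
      have hj0 : 0 ≤ j := le_trans (by omega) ((PySem.List.mem_pyRange_one).1 hj).1
      rw [pvGetD_cons_succ a t j hj0]

lemma pvMinD_le (P : List (Int × Int)) (d : Int) : pvMinD P d ≤ d :=
  (PySem.List.foldl_min_le _ _).1

lemma pvMinD_le_mem (P : List (Int × Int)) (d : Int) {p : Int × Int} (hp : p ∈ P) :
    pvMinD P d ≤ pvDiffAbs p.1 p.2 :=
  (PySem.List.foldl_min_le _ _).2 _ (List.mem_map_of_mem hp)

lemma pvMinD_cons (p : Int × Int) (P : List (Int × Int)) (d : Int) :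
    pvMinD (p :: P) d = pvMinD P (min d (pvDiffAbs p.1 p.2)) := by
  simp [pvMinD]

lemma pvCore : ∀ (P : List (Int × Int)) (arr : List (Int × Int)) (d : Int),
    P.foldl pvStep (arr, some d) =
      ((if pvMinD P d = d then arr ++ P.filter (fun p => decide (pvDiffAbs p.1 p.2 = d))
        else P.filter (fun p => decide (pvDiffAbs p.1 p.2 = pvMinD P d))),
       some (pvMinD P d)) := by
  intro P
  induction P with
  | nil => intro arr d; simp [pvMinD]
  | cons p P ih =>
    intro arr d
    rw [List.foldl_cons]
    have hstep : pvStep (arr, some d) p =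
        (if pvDiffAbs p.1 p.2 < d then ([p], some (pvDiffAbs p.1 p.2))
         else if pvDiffAbs p.1 p.2 = d then (arr ++ [p], some d) else (arr, some d)) := rfl
    rw [hstep]
    rcases lt_trichotomy (pvDiffAbs p.1 p.2) d with hlt | heq | hgt
    · rw [if_pos hlt, ih]
      have hmin : pvMinD (p :: P) d = pvMinD P (pvDiffAbs p.1 p.2) := by
        rw [pvMinD_cons, min_eq_right hlt.le]
      have hP := pvMinD_le P (pvDiffAbs p.1 p.2)
      have hne : ¬ (pvMinD (p :: P) d = d) := by omega
      rw [if_neg hne, hmin]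
      by_cases hc : pvMinD P (pvDiffAbs p.1 p.2) = pvDiffAbs p.1 p.2
      · rw [if_pos hc, hc, List.filter_cons_of_pos (by simp)]
        simp
      · rw [if_neg hc, List.filter_cons_of_neg (by simp; omega)]
    · rw [if_neg (by omega), if_pos heq, ih]
      have hmin : pvMinD (p :: P) d = pvMinD P d := by
        rw [pvMinD_cons, min_eq_left heq.ge]
      rw [hmin]
      have hP := pvMinD_le P d
      by_cases hc : pvMinD P d = d
      · rw [if_pos hc, if_pos hc, List.filter_cons_of_pos (by simp [heq])]
        simp
      · rw [if_neg hc, if_neg hc, List.filter_cons_of_neg (by simp; omega)]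
    · rw [if_neg (by omega), if_neg (by omega), ih]
      have hmin : pvMinD (p :: P) d = pvMinD P d := by
        rw [pvMinD_cons, min_eq_left hgt.le]
      rw [hmin]
      have hP := pvMinD_le P d
      by_cases hc : pvMinD P d = d
      · rw [if_pos hc, if_pos hc, List.filter_cons_of_neg (by simp; omega)]
      · rw [if_neg hc, if_neg hc, List.filter_cons_of_neg (by simp; omega)]

lemma pvA_filter (p0 : Int × Int) (P : List (Int × Int)) :
    ((p0 :: P).foldl pvStep ([], none)).1 =
      (p0 :: P).filter (fun p => decide (pvDiffAbs p.1 p.2 = pvMinD P (pvDiffAbs p0.1 p0.2))) := by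
  rw [List.foldl_cons]
  have h0 : pvStep ([], none) p0 = ([p0], some (pvDiffAbs p0.1 p0.2)) := rfl
  rw [h0, pvCore]
  set dp := pvDiffAbs p0.1 p0.2 with hdp
  have hP := pvMinD_le P dp
  by_cases hc : pvMinD P dp = dp
  · rw [if_pos hc, hc, List.filter_cons_of_pos (by simp [hdp])]
    simp
  · rw [if_neg hc, List.filter_cons_of_neg (by simp [← hdp]; omega)]

lemma pvPairs_mem_iff (x y : Int) : ∀ (L : List Int),
    ((x, y) ∈ pvPairs L ↔ [x, y].Sublist L) := by
  intro L
  induction L with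
  | nil => simp [pvPairs]
  | cons a t ih =>
    simp only [pvPairs, List.mem_append, List.mem_map, ih]
    constructor
    · rintro (⟨b, hb, he⟩ | hs)
      · injection he with h1 h2
        subst h1; subst h2
        exact List.cons_sublist_cons.2 (List.singleton_sublist.2 hb)
      · exact hs.cons a
    · intro hs
      cases hs with
      | cons _ h => exact Or.inr h
      | cons₂ _ h => exact Or.inl ⟨y, List.singleton_sublist.1 h, rfl⟩

lemma pvSub2_split (x y : Int) : ∀ (s : List Int), [x, y].Sublist s →
    ∃ u v w, s = u ++ x :: v ++ y :: w := by
  intro s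
  induction s with
  | nil => intro h; simp at h
  | cons a t ih =>
    intro h
    cases h with
    | cons _ h =>
      obtain ⟨u, v, w, rfl⟩ := ih h
      exact ⟨a :: u, v, w, rfl⟩
    | cons₂ _ h =>
      obtain ⟨v, w, rfl⟩ := List.append_of_mem (List.singleton_sublist.1 h)
      exact ⟨[], v, w, rfl⟩

lemma pvGap_mem_cons (a : Int) (t : List Int) {g : Int} (h : g ∈ pvAdjGaps t) :
    g ∈ pvAdjGaps (a :: t) := by
  cases t with
  | nil => simp [pvAdjGaps] at h
  | cons b t' => simp [pvAdjGaps]; right; exact h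

lemma pvGap_mem_prefix {g : Int} : ∀ (u r : List Int), g ∈ pvAdjGaps r → g ∈ pvAdjGaps (u ++ r) := by
  intro u
  induction u with
  | nil => intro r h; simpa using h
  | cons a u' ih => intro r h; exact pvGap_mem_cons _ _ (ih r h)

lemma pvTele (m : Int) : ∀ (v : List Int) (x y : Int) (w : List Int),
    (x :: (v ++ y :: w)).Pairwise (· ≤ ·) →
    (∀ g ∈ pvAdjGaps (x :: (v ++ y :: w)), m ≤ g) → m ≤ y - x := by
  intro v
  induction v with
  | nil =>
    intro x y w _ hlb
    exact hlb _ (by simp [pvAdjGaps])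
  | cons b v' ih =>
    intro x y w hpw hlb
    have hxb : x ≤ b := (List.pairwise_cons.1 hpw).1 b (by simp)
    have htail : (b :: (v' ++ y :: w)).Pairwise (· ≤ ·) := (List.pairwise_cons.1 hpw).2
    have hlb' : ∀ g ∈ pvAdjGaps (b :: (v' ++ y :: w)), m ≤ g := by
      intro g hg
      exact hlb g (pvGap_mem_cons x _ hg)
    have := ih b y w htail hlb'
    omega

lemma pvGapLB {s : List Int} {m : Int} (hpw : s.Pairwise (· ≤ ·))
    (hlb : ∀ g ∈ pvAdjGaps s, m ≤ g) {x y : Int} (hs : [x, y].Sublist s) : m ≤ y - x := by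
  obtain ⟨u, v, w, rfl⟩ := pvSub2_split x y s hs
  have hsuf : (x :: (v ++ y :: w)).Sublist (u ++ x :: v ++ y :: w) := by
    simp
  refine pvTele m v x y w (hpw.sublist (by simp)) ?_
  intro g hg
  exact hlb g (by simpa using pvGap_mem_prefix u (x :: v ++ y :: w) (by simpa using hg))

lemma pvSub2_of_mem_ne {x y : Int} : ∀ {L : List Int}, x ∈ L → y ∈ L → x ≠ y →
    [x, y].Sublist L ∨ [y, x].Sublist L := by
  intro L
  induction L with
  | nil => simp
  | cons a t ih =>
    intro hx hy hne
    rcases List.mem_cons.1 hx with rfl | hx'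
    · have hy' : y ∈ t := by
        rcases List.mem_cons.1 hy with h | h
        · exact absurd h.symm hne
        · exact h
      exact Or.inl (List.cons_sublist_cons.2 (List.singleton_sublist.2 hy'))
    · rcases List.mem_cons.1 hy with rfl | hy'
      · exact Or.inr (List.cons_sublist_cons.2 (List.singleton_sublist.2 hx'))
      · rcases ih hx' hy' hne with h | h
        · exact Or.inl (h.cons a)
        · exact Or.inr (h.cons a)

lemma pvSub2_of_count {x : Int} : ∀ {L : List Int}, 2 ≤ L.count x → [x, x].Sublist L := by
  intro L
  induction L with
  | nil => simp
  | cons a t ih =>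
    intro hc
    by_cases ha : a = x
    · subst ha
      have : 1 ≤ t.count a := by
        rw [List.count_cons_self] at hc; omega
      exact List.cons_sublist_cons.2 (List.singleton_sublist.2 (List.count_pos_iff.1 (by omega)))
    · have : t.count x = (a :: t).count x := by
        rw [List.count_cons_of_ne (by simpa using ha)]
      exact (ih (by omega)).cons a

lemma pvGap_exists {g : Int} : ∀ {s : List Int}, g ∈ pvAdjGaps s →
    ∃ u b c w, s = u ++ b :: c :: w ∧ g = c - b := by
  intro s
  induction s with
  | nil => simp [pvAdjGaps]
  | cons a t ih =>
    intro hg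
    cases t with
    | nil => simp [pvAdjGaps] at hg
    | cons b t' =>
      rcases List.mem_cons.1 hg with rfl | hg'
      · exact ⟨[], a, b, t', rfl, rfl⟩
      · obtain ⟨u, b', c', w, he, hgv⟩ := ih hg'
        exact ⟨a :: u, b', c', w, by simp [he], hgv⟩

lemma pvGaps_eq : ∀ (s : List Int),
    ((PySem.List.pyRange 0 ((s.length : Int) - 1) 1).map (fun k =>
      PySem.List.pyGetD s (k + 1) 0 - PySem.List.pyGetD s k 0)) = pvAdjGaps s := by
  intro s
  induction s with
  | nil => simp [pvAdjGaps, PySem.List.pyRange_one_eq_nil]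
  | cons a t ih =>
    cases t with
    | nil => simp [pvAdjGaps, PySem.List.pyRange_one_eq_nil]
    | cons b t' =>
      have hN : ((a :: b :: t').length : Int) - 1 = ((b :: t').length : Int) := by simp
      rw [hN]
      rw [PySem.List.pyRange_one_cons (by simp)]
      rw [List.map_cons]
      have hhead : PySem.List.pyGetD (a :: b :: t') (0 + 1) 0 - PySem.List.pyGetD (a :: b :: t') 0 0 = b - a := by
        rw [pvGetD_cons_succ _ _ 0 le_rfl]
        simp [PySem.List.pyGetD_zero_cons]
      rw [hhead]
      have h1 : PySem.List.pyRange (0 + 1) (((b :: t').length : Int)) 1 =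
          (PySem.List.pyRange 0 (((b :: t').length : Int) - 1) 1).map (· + 1) := by
        have := pvRange_shift 0 (((b :: t').length : Int) - 1)
        simpa using this
      rw [h1, List.map_map]
      show (b - a) :: _ = pvAdjGaps (a :: b :: t')
      have h2 : (PySem.List.pyRange 0 (((b :: t').length : Int) - 1) 1).map
          ((fun k => PySem.List.pyGetD (a :: b :: t') (k + 1) 0 -
            PySem.List.pyGetD (a :: b :: t') k 0) ∘ (· + 1))
          = (PySem.List.pyRange 0 (((b :: t').length : Int) - 1) 1).map (fun k =>
            PySem.List.pyGetD (b :: t') (k + 1) 0 - PySem.List.pyGetD (b :: t') k 0) := by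
        apply List.map_congr_left
        intro k hk
        have hk0 : 0 ≤ k := ((PySem.List.mem_pyRange_one).1 hk).1
        simp only [Function.comp_apply]
        have e1 : PySem.List.pyGetD (a :: b :: t') (k + 1 + 1) 0 = PySem.List.pyGetD (b :: t') (k + 1) 0 :=
          pvGetD_cons_succ a (b :: t') (k + 1) (by omega)
        have e2 : PySem.List.pyGetD (a :: b :: t') (k + 1) 0 = PySem.List.pyGetD (b :: t') k 0 :=
          pvGetD_cons_succ a (b :: t') k hk0
        rw [e1, e2]
      rw [h2, ih]
      rfl


-- B's double comprehension over indices is the filtered pvPairs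
lemma pvBfold (L : List Int) (dd : Int) :
    (PySem.List.pyRange 0 (L.length : Int) 1).flatMap (fun i =>
      ((PySem.List.pyRange (i + 1) (L.length : Int) 1).filter (fun j =>
          decide (|PySem.List.pyGetD L i 0 - PySem.List.pyGetD L j 0| = dd))).map (fun j =>
        (PySem.List.pyGetD L i 0, PySem.List.pyGetD L j 0)))
    = (pvPairs L).filter (fun p => decide (|p.1 - p.2| = dd)) := by
  have step1 : (PySem.List.pyRange 0 (L.length : Int) 1).foldl (fun acc i => acc ++
      ((PySem.List.pyRange (i + 1) (L.length : Int) 1).filter (fun j =>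
          decide (|PySem.List.pyGetD L i 0 - PySem.List.pyGetD L j 0| = dd))).map (fun j =>
        (PySem.List.pyGetD L i 0, PySem.List.pyGetD L j 0))) [] =
      (PySem.List.pyRange 0 (L.length : Int) 1).flatMap (fun i =>
      ((PySem.List.pyRange (i + 1) (L.length : Int) 1).filter (fun j =>
          decide (|PySem.List.pyGetD L i 0 - PySem.List.pyGetD L j 0| = dd))).map (fun j =>
        (PySem.List.pyGetD L i 0, PySem.List.pyGetD L j 0))) := by
    rw [PySem.List.foldl_append_eq_flatMap]
    simp
  rw [← step1]
  have hfun : (fun (acc : List (Int × Int)) (i : Int) => acc ++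
      ((PySem.List.pyRange (i + 1) (L.length : Int) 1).filter (fun j =>
          decide (|PySem.List.pyGetD L i 0 - PySem.List.pyGetD L j 0| = dd))).map (fun j =>
        (PySem.List.pyGetD L i 0, PySem.List.pyGetD L j 0))) =
      (fun (acc : List (Int × Int)) (i : Int) =>
        (PySem.List.pyRange (i + 1) (L.length : Int) 1).foldl (fun acc j =>
          if decide (|PySem.List.pyGetD L i 0 - PySem.List.pyGetD L j 0| = dd) then
            acc ++ [(PySem.List.pyGetD L i 0, PySem.List.pyGetD L j 0)] else acc) acc) := by
    funext acc i
    exact (PySem.List.foldl_append_if _ _ _ _).symm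
  rw [hfun]
  have hnest := pvNestedFold (g := fun st x y =>
    if decide (|x - y| = dd) then st ++ [(x, y)] else st) L []
  refine Eq.trans hnest ?_
  rw [PySem.List.foldl_append_if (fun p => decide (|p.1 - p.2| = dd)) (fun p => (p.1, p.2)) (pvPairs L) []]
  simp


lemma pvB_eq_filter (L : List Int) (h2 : 2 ≤ L.length) :
    proches2_alt L = (pvPairs L).filter (fun p => decide (|p.1 - p.2| = pvDStar L)) := by
  simp only [proches2_alt]
  rw [if_neg (by omega)]
  have hlen : ((L.length : Int) - 1) = ((PySem.List.sorted L (fun x => x) false).length : Int) - 1 := by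
    rw [PySem.List.length_sorted]
  rw [hlen, pvGaps_eq (PySem.List.sorted L (fun x => x) false)]
  exact pvBfold L _

lemma pvDStar_min? (L : List Int) (h2 : 2 ≤ L.length) :
    PySem.List.min? (pvAdjGaps (PySem.List.sorted L (fun x => x) false)) (fun x => x) =
      some (pvDStar L) := by
  have hany : ∀ (s : List Int), 2 ≤ s.length → pvAdjGaps s ≠ [] := by
    intro s hs
    rcases s with _ | ⟨c, _ | ⟨c', s'⟩⟩ <;> simp [pvAdjGaps] at hs ⊢
  have hne : pvAdjGaps (PySem.List.sorted L (fun x => x) false) ≠ [] :=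
    hany _ (by rw [PySem.List.length_sorted]; exact h2)
  cases h : PySem.List.min? (pvAdjGaps (PySem.List.sorted L (fun x => x) false)) (fun x => x) with
  | none => exact absurd ((PySem.List.min?_eq_none_iff _ _).1 h) hne
  | some m => simp [pvDStar, h]

lemma pvSorted_pairwise (L : List Int) :
    (PySem.List.sorted L (fun x => x) false).Pairwise (· ≤ ·) := by
  simpa using PySem.List.sorted_pairwise (xs := L) (key := fun x => x)

lemma pvLowerBound (L : List Int) (h2 : 2 ≤ L.length) :
    ∀ p ∈ pvPairs L, pvDStar L ≤ |p.1 - p.2| := by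
  intro p hp
  have hperm : (PySem.List.sorted L (fun x => x) false).Perm L := PySem.List.sorted_perm ..
  have hpw := pvSorted_pairwise L
  have hlb : ∀ g ∈ pvAdjGaps (PySem.List.sorted L (fun x => x) false), pvDStar L ≤ g := by
    intro g hg
    exact PySem.List.min?_isMin (pvDStar_min? L h2) g hg
  have hsub : [p.1, p.2].Sublist L := (pvPairs_mem_iff p.1 p.2 L).1 hp
  by_cases hxy : p.1 = p.2
  · have hc2 : 2 ≤ L.count p.1 := by
      have hcl := hsub.count_le p.1
      rw [← hxy] at hcl
      simpa using hcl
    have hcs : 2 ≤ (PySem.List.sorted L (fun x => x) false).count p.1 := by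
      rw [hperm.count_eq]; exact hc2
    have hb := pvGapLB hpw hlb (pvSub2_of_count hcs)
    rw [hxy]; simp; omega
  · have h1s : p.1 ∈ PySem.List.sorted L (fun x => x) false :=
      hperm.mem_iff.2 (hsub.subset (by simp))
    have h2s : p.2 ∈ PySem.List.sorted L (fun x => x) false :=
      hperm.mem_iff.2 (hsub.subset (by simp))
    rcases pvSub2_of_mem_ne h1s h2s hxy with hss | hss
    · have hb := pvGapLB hpw hlb hss
      have h12 : p.1 ≤ p.2 := (List.pairwise_cons.1 (hpw.sublist hss)).1 p.2 (by simp)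
      rw [abs_sub_comm, abs_of_nonneg (by omega)]
      exact hb
    · have hb := pvGapLB hpw hlb hss
      have h21 : p.2 ≤ p.1 := by
        have := (List.pairwise_cons.1 (hpw.sublist hss)).1 p.1 (by simp)
        exact this
      rw [abs_of_nonneg (by omega)]
      exact hb

lemma pvAttained (L : List Int) (h2 : 2 ≤ L.length) :
    ∃ p ∈ pvPairs L, |p.1 - p.2| = pvDStar L := by
  have hperm : (PySem.List.sorted L (fun x => x) false).Perm L := PySem.List.sorted_perm ..
  have hpw := pvSorted_pairwise L
  have hmem : pvDStar L ∈ pvAdjGaps (PySem.List.sorted L (fun x => x) false) :=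
    PySem.List.min?_mem (pvDStar_min? L h2)
  obtain ⟨u, bb, cc, w, hsplit, hval⟩ := pvGap_exists hmem
  have hsubs : [bb, cc].Sublist (PySem.List.sorted L (fun x => x) false) := by
    rw [hsplit]
    exact List.Sublist.trans
      (List.cons_sublist_cons.2 (List.cons_sublist_cons.2 (List.nil_sublist w)))
      (List.sublist_append_right u _)
  have hbc : bb ≤ cc := (List.pairwise_cons.1 (hpw.sublist hsubs)).1 cc (by simp)
  have hbL : bb ∈ L := hperm.mem_iff.1 (hsubs.subset (by simp))
  have hcL : cc ∈ L := hperm.mem_iff.1 (hsubs.subset (by simp))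
  by_cases hbceq : bb = cc
  · have hcs : 2 ≤ (PySem.List.sorted L (fun x => x) false).count bb := by
      rw [hsplit, ← hbceq]
      simp [List.count_append]
      omega
    have hc2 : 2 ≤ L.count bb := by rw [← hperm.count_eq]; exact hcs
    refine ⟨(bb, bb), (pvPairs_mem_iff bb bb L).2 (pvSub2_of_count hc2), ?_⟩
    simp
    omega
  · rcases pvSub2_of_mem_ne hbL hcL hbceq with hss | hss
    · refine ⟨(bb, cc), (pvPairs_mem_iff bb cc L).2 hss, ?_⟩
      simp only
      rw [abs_sub_comm, abs_of_nonneg (by omega)]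
      omega
    · refine ⟨(cc, bb), (pvPairs_mem_iff cc bb L).2 hss, ?_⟩
      simp only
      rw [abs_of_nonneg (by omega)]
      omega

lemma pvA_pairs (L : List Int) : proches2 L = ((pvPairs L).foldl pvStep ([], none)).1 :=
  congrArg Prod.fst (pvNestedFold (fun st x y => pvStep st (x, y)) L ([], none))

-- ===== VERDICT (by name: the statement is the Claim_ definition above) =====
theorem proches2_spec : Claim_equal_proches2 := by
  intro L _
  unfold Spec_proches2
  by_cases hlen : L.length < 2
  · have hpe : pvPairs L = [] := by
      rcases L with _ | ⟨a, _ | ⟨b, t⟩⟩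
      · rfl
      · simp [pvPairs]
      · simp at hlen
    rw [pvA_pairs, hpe]
    rcases L with _ | ⟨a, _ | ⟨b, t⟩⟩
    · rfl
    · rfl
    · simp at hlen
  · have hlen' : 2 ≤ L.length := by omega
    clear hlen
    rcases L with _ | ⟨a, _ | ⟨b, t⟩⟩
    · simp at hlen'
    · simp at hlen'
    · have h2 : 2 ≤ (a :: b :: t).length := by simp
      have hpp : pvPairs (a :: b :: t) =
          ((a, b) : Int × Int) :: (t.map (fun y => (a, y)) ++ pvPairs (b :: t)) := by
        simp [pvPairs]
      set P := t.map (fun y => (a, y)) ++ pvPairs (b :: t) with hP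
      set M := pvMinD P (pvDiffAbs a b) with hM
      have hAf : proches2 (a :: b :: t) =
          (((a, b) : Int × Int) :: P).filter (fun p => decide (pvDiffAbs p.1 p.2 = M)) := by
        rw [pvA_pairs, hpp, pvA_filter]
      -- the two minima agree
      have hM_eq : M = pvDStar (a :: b :: t) := by
        have hM_lb : ∀ p ∈ ((a, b) : Int × Int) :: P, M ≤ pvDiffAbs p.1 p.2 := by
          intro p hp
          rcases List.mem_cons.1 hp with rfl | hp'
          · exact pvMinD_le P _
          · exact pvMinD_le_mem P _ hp'
        have hM_mem : ∃ p ∈ ((a, b) : Int × Int) :: P, pvDiffAbs p.1 p.2 = M := by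
          rcases PySem.List.foldl_min_mem (P.map (fun p => pvDiffAbs p.1 p.2)) (pvDiffAbs a b)
            with h | h
          · refine ⟨(a, b), List.mem_cons_self .., ?_⟩
            show pvDiffAbs a b = M
            rw [hM, pvMinD]
            exact h.symm
          · obtain ⟨p, hp, he⟩ := List.mem_map.1 h
            exact ⟨p, List.mem_cons_of_mem _ hp, he⟩
        refine le_antisymm ?_ ?_
        · obtain ⟨p, hp, he⟩ := pvAttained (a :: b :: t) h2
          rw [hpp] at hp
          calc M ≤ pvDiffAbs p.1 p.2 := hM_lb p hp
            _ = |p.1 - p.2| := pvDiffAbs_abs _ _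
            _ = pvDStar (a :: b :: t) := he
        · obtain ⟨p, hp, he⟩ := hM_mem
          calc pvDStar (a :: b :: t) ≤ |p.1 - p.2| := by
                apply pvLowerBound (a :: b :: t) h2
                rw [hpp]; exact hp
            _ = pvDiffAbs p.1 p.2 := (pvDiffAbs_abs _ _).symm
            _ = M := he
      rw [hAf, pvB_eq_filter (a :: b :: t) h2, hpp]
      apply List.filter_congr
      intro p _
      rw [pvDiffAbs_abs, hM_eq]
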